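-- pv_equiv track=rewrite | github.com/reallocf/data-flow-control | vldb_2026_big_paper_experiments/src/vldb_experiments/strategies/tpch_self_join_policy_queries.py | _chunked_from_clause
-- ===== SOURCE A (Python) =====
-- from itertools import islice
--
-- ALIAS_CHUNK_SIZE = 32
--
-- def _alias_names(self_join_count: int) -> list[str]:
--     if self_join_count < 1:
--         msg = "self_join_count must be at least 1"
--         raise ValueError(msg)
--     return [f"l{i}" for i in range(1, self_join_count + 2)]
--
-- def _chunked(iterable: list[str], chunk_size: int) -> list[list[str]]:
--     iterator = iter(iterable)
--     return [list(chunk) for chunk in iter(lambda: list(islice(iterator, chunk_size)), [])]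
--
-- def _chunk_column_name(alias: str) -> str:
--     return f"{alias}_shipdate"
--
-- def _chunk_subquery(chunk_aliases: list[str], chunk_index: int) -> tuple[str, dict[str, str]]:
--     inner_aliases = [f"c{chunk_index}_{idx}" for idx in range(1, len(chunk_aliases) + 1)]
--     alias_map = dict(zip(chunk_aliases, inner_aliases, strict=True))
--     select_lines = [f"    {inner_aliases[0]}.rowid AS base_rowid"]
--     outer_refs: dict[str, str] = {}
--     for outer_alias, inner_alias in alias_map.items():
--         column_name = _chunk_column_name(outer_alias)
--         select_lines.append(f"    {inner_alias}.l_shipdate AS {column_name}")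
--         outer_refs[outer_alias] = f"chunk_{chunk_index}.{column_name}"
--
--     tables = ",\n      ".join(f"lineitem {inner_alias}" for inner_alias in inner_aliases)
--     predicates = " AND ".join(
--         f"{inner_aliases[0]}.rowid = {inner_alias}.rowid" for inner_alias in inner_aliases[1:]
--     )
--     where_clause = f"\n    WHERE {predicates}" if predicates else ""
--     subquery = (
--         "JOIN (\n"
--         "  SELECT\n"
--         + ",\n".join(select_lines)
--         + "\n"
--         + "    FROM\n"
--         + f"      {tables}"
--         + where_clause
--         + f"\n) chunk_{chunk_index}\n"
--         + f"  ON l1.rowid = chunk_{chunk_index}.base_rowid"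
--     )
--     return subquery, outer_refs
--
-- def _chunked_from_clause(self_join_count: int) -> str:
--     aliases = _alias_names(self_join_count)
--     lines = ["FROM lineitem l1"]
--     for chunk_index, chunk_aliases in enumerate(
--         _chunked(aliases[1:], ALIAS_CHUNK_SIZE),
--         start=1,
--     ):
--         subquery, _ = _chunk_subquery(chunk_aliases, chunk_index)
--         lines.append(subquery)
--     return "\n".join(lines)
-- ===== SOURCE B (Python) =====
-- # B: one streaming pass over the alias indices with string accumulators that are
-- # flushed at chunk boundaries -- no alias list, no chunk lists, no joins, no dicts.
-- ALIAS_CHUNK_SIZE = 32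
--
-- def _chunked_from_clause(self_join_count: int) -> str:
--     if self_join_count < 1:
--         raise ValueError("self_join_count must be at least 1")
--     out = "FROM lineitem l1"
--     chunk_index = 0
--     off = 0
--     sel = tab = pred = ""
--     for i in range(2, self_join_count + 2):
--         if off == 0:
--             chunk_index += 1
--             sel = f"    c{chunk_index}_1.rowid AS base_rowid"
--             tab = ""
--             pred = ""
--         off += 1
--         inner = f"c{chunk_index}_{off}"
--         sel += f",\n    {inner}.l_shipdate AS l{i}_shipdate"
--         tab += ("" if off == 1 else ",\n      ") + f"lineitem {inner}"
--         if off > 1: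
--             pred += ("" if off == 2 else " AND ") + f"c{chunk_index}_1.rowid = {inner}.rowid"
--         if off == ALIAS_CHUNK_SIZE or i == self_join_count + 1:
--             where = f"\n    WHERE {pred}" if pred else ""
--             out += (
--                 f"\nJOIN (\n  SELECT\n{sel}\n    FROM\n      {tab}{where}"
--                 f"\n) chunk_{chunk_index}\n  ON l1.rowid = chunk_{chunk_index}.base_rowid"
--             )
--             off = 0
--     return out
-- ===== Notes on version B (the rewrite author's own statement) =====
-- stated objective: alternative
-- what changed: Replaces A's staged pipeline (build the alias list, chunk it with islice, then per chunk build select/table/predicate lists via dict(zip) and join them) by one streaming pass over the alias indices that grows the SELECT/FROM/WHERE fragments as plain string accumulators and flushes an assembled chunk block whenever the chunk fills or the indices run out; no intermediate lists, joins or dicts.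
import Mathlib
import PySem

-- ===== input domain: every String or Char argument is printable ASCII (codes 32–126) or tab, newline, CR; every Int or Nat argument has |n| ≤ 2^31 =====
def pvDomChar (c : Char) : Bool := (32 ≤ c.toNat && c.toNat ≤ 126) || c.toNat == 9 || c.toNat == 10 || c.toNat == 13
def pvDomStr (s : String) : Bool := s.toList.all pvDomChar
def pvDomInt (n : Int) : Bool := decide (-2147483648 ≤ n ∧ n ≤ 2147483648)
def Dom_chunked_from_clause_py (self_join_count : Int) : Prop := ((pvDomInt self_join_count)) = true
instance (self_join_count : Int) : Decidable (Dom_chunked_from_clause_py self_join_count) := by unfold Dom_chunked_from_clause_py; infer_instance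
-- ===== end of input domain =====

-- B replaces A's staged pipeline (alias list -> islice chunking -> per-chunk dict/zip
-- and joins) by ONE streaming pass over the alias indices with string accumulators
-- flushed at chunk boundaries; objective: alternative (return value only; no mutation).

-- ===== PORT A =====
def ALIAS_CHUNK_SIZE : Int := 32

-- raise ValueError when self_join_count < 1: that input is excluded by Pre_; [] stands for the raise
def alias_names_py (self_join_count : Int) : List String :=
  if self_join_count < 1 then []
  else (PySem.List.pyRange 1 (self_join_count + 2) 1).map (fun i => "l" ++ PySem.Int.toStr i)

-- list(islice(iterator, chunk_size)) repeatedly = take/drop chunk_size; A only calls it with 32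
def chunked_py (xs : List String) (chunk_size : Int) : List (List String) :=
  if h : chunk_size ≤ 0 ∨ xs = [] then []
  else xs.take chunk_size.toNat :: chunked_py (xs.drop chunk_size.toNat) chunk_size
termination_by xs.length
decreasing_by
  rw [not_or] at h
  have hx : 0 < xs.length := List.length_pos_of_ne_nil h.2
  have : 0 < chunk_size.toNat := by omega
  simp only [List.length_drop]; omega

def chunk_column_name_py (alias_ : String) : String := alias_ ++ "_shipdate"

-- inner_aliases[0] can only raise on an empty chunk, which _chunked never yields; "" is the pyGetD default
def chunk_subquery_py (chunk_aliases : List String) (chunk_index : Int) :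
    String × PySem.Dict String String :=
  let inner_aliases := (PySem.List.pyRange 1 ((chunk_aliases.length : Int) + 1) 1).map
    (fun idx => "c" ++ PySem.Int.toStr chunk_index ++ "_" ++ PySem.Int.toStr idx)
  let alias_map : PySem.Dict String String := PySem.Dict.ofList (chunk_aliases.zip inner_aliases)
  let st := alias_map.items.foldl
    (fun (st : List String × PySem.Dict String String) p =>
      (st.1 ++ ["    " ++ p.2 ++ ".l_shipdate AS " ++ chunk_column_name_py p.1],
       st.2.insert p.1 ("chunk_" ++ PySem.Int.toStr chunk_index ++ "." ++ chunk_column_name_py p.1)))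
    (["    " ++ PySem.List.pyGetD inner_aliases 0 "" ++ ".rowid AS base_rowid"], PySem.Dict.empty)
  let tables := PySem.Str.join ",\n      " (inner_aliases.map (fun inner_alias => "lineitem " ++ inner_alias))
  let predicates := PySem.Str.join " AND " ((PySem.List.slice inner_aliases (some 1) none).map
    (fun inner_alias => PySem.List.pyGetD inner_aliases 0 "" ++ ".rowid = " ++ inner_alias ++ ".rowid"))
  let where_clause := if predicates ≠ "" then "\n    WHERE " ++ predicates else ""
  ("JOIN (\n" ++ "  SELECT\n" ++ PySem.Str.join ",\n" st.1 ++ "\n" ++ "    FROM\n" ++ ("      " ++ tables)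
     ++ where_clause ++ ("\n) chunk_" ++ PySem.Int.toStr chunk_index ++ "\n")
     ++ ("  ON l1.rowid = chunk_" ++ PySem.Int.toStr chunk_index ++ ".base_rowid"), st.2)

def chunked_from_clause_py (self_join_count : Int) : String :=
  let aliases := alias_names_py self_join_count
  let lines :=
    (PySem.List.enumerate (chunked_py (PySem.List.slice aliases (some 1) none) ALIAS_CHUNK_SIZE) 1).foldl
      (fun lines p => lines ++ [(chunk_subquery_py p.2 p.1).1]) ["FROM lineitem l1"]
  PySem.Str.join "\n" lines

-- ===== PORT B =====
-- (helper of B's port: the flushed chunk block appended to out, = Source B's f-string)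
def pvFlushB (j : Int) (sel tab pred : String) : String :=
  "\n" ++ "JOIN (\n" ++ "  SELECT\n" ++ sel ++ "\n" ++ "    FROM\n" ++ "      " ++ tab
    ++ (if pred ≠ "" then "\n    WHERE " ++ pred else "")
    ++ "\n) chunk_" ++ PySem.Int.toStr j ++ "\n"
    ++ "  ON l1.rowid = chunk_" ++ PySem.Int.toStr j ++ ".base_rowid"

-- (helper of B's port: the loop body of Source B's single for-loop; state = (out, chunk_index, off, sel, tab, pred))
def pvStepB (n : Int) (st : String × Int × Int × String × String × String) (i : Int) :
    String × Int × Int × String × String × String :=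
  match st with
  | (out, cj0, off0, sel0, tab0, pred0) =>
    let cj := if off0 = 0 then cj0 + 1 else cj0
    let sel1 := if off0 = 0 then "    " ++ "c" ++ PySem.Int.toStr cj ++ "_" ++ "1" ++ ".rowid AS base_rowid" else sel0
    let tab1 := if off0 = 0 then "" else tab0
    let pred1 := if off0 = 0 then "" else pred0
    let off := off0 + 1
    let inner := "c" ++ PySem.Int.toStr cj ++ "_" ++ PySem.Int.toStr off
    let sel := sel1 ++ ",\n" ++ "    " ++ inner ++ ".l_shipdate AS " ++ "l" ++ PySem.Int.toStr i ++ "_shipdate"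
    let tab := tab1 ++ (if off = 1 then "" else ",\n      ") ++ "lineitem " ++ inner
    let pred := if 1 < off then
        pred1 ++ (if off = 2 then "" else " AND ") ++ "c" ++ PySem.Int.toStr cj ++ "_" ++ "1" ++ ".rowid = " ++ inner ++ ".rowid"
      else pred1
    if off = ALIAS_CHUNK_SIZE ∨ i = n + 1 then
      (out ++ pvFlushB cj sel tab pred, cj, 0, sel, tab, pred)
    else (out, cj, off, sel, tab, pred)

-- raise ValueError when self_join_count < 1: excluded by Pre_; "" stands for the raise
def chunked_from_clause_py_alt (self_join_count : Int) : String :=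
  if self_join_count < 1 then ""
  else ((PySem.List.pyRange 2 (self_join_count + 2) 1).foldl (pvStepB self_join_count)
          ("FROM lineitem l1", 0, 0, "", "", "")).1

-- ===== PRECONDITION & SPEC =====
-- Pre_ excludes self_join_count < 1, on which the Python raises ValueError.
def Pre_chunked_from_clause_py (self_join_count : Int) : Prop := 1 ≤ self_join_count
instance (self_join_count : Int) : Decidable (Pre_chunked_from_clause_py self_join_count) := by
  unfold Pre_chunked_from_clause_py; infer_instance

def pvWitness_chunked_from_clause_py : Int := 1

def Spec_chunked_from_clause_py (self_join_count : Int) (out : String) : Prop :=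
  out = chunked_from_clause_py_alt self_join_count
instance (self_join_count : Int) (out : String) : Decidable (Spec_chunked_from_clause_py self_join_count out) := by
  unfold Spec_chunked_from_clause_py; infer_instance

-- ===== CLAIM (what is proved, stated in full; the proofs are below) =====
def Claim_equal_chunked_from_clause_py : Prop := ∀ (self_join_count : Int),
  Dom_chunked_from_clause_py self_join_count → Pre_chunked_from_clause_py self_join_count →
  Spec_chunked_from_clause_py self_join_count (chunked_from_clause_py self_join_count)

-- ===== LEMMAS AND PROOFS =====

-- decimal digits: value function and injectivity of Nat.toDigits 10
def pvDigitVal (c : Char) : Nat := c.toNat - 48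
def pvVal (l : List Char) : Nat := l.foldl (fun a c => 10 * a + pvDigitVal c) 0

def pvMyD (n : Nat) : List Char :=
  if n < 10 then [Nat.digitChar n]
  else pvMyD (n / 10) ++ [Nat.digitChar (n % 10)]
termination_by n
decreasing_by omega

lemma pvDigitVal_digitChar (n : Nat) (h : n < 10) : pvDigitVal (Nat.digitChar n) = n := by
  interval_cases n <;> decide

lemma toDigitsCore_eq_myD : ∀ (f n : Nat) (ds : List Char), n < f →
    Nat.toDigitsCore 10 f n ds = pvMyD n ++ ds := by
  intro f
  induction f with
  | zero => intro n ds h; omega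
  | succ f ih =>
    intro n ds h
    simp only [Nat.toDigitsCore]
    by_cases h0 : n / 10 = 0
    · have hn : n < 10 := by omega
      rw [if_pos h0, pvMyD, if_pos hn]
      have : n % 10 = n := by omega
      rw [this]
      rfl
    · have hf : n / 10 < f := by omega
      rw [if_neg h0, ih _ _ hf]
      conv_rhs => rw [pvMyD]
      rw [if_neg (by omega : ¬ n < 10)]
      simp

lemma pvVal_append_digit (l : List Char) (c : Char) :
    pvVal (l ++ [c]) = 10 * pvVal l + pvDigitVal c := by
  simp [pvVal, List.foldl_append]

lemma pvVal_myD : ∀ n, pvVal (pvMyD n) = n := by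
  intro n
  induction n using pvMyD.induct with
  | case1 n h =>
    rw [pvMyD, if_pos h]
    simp [pvVal, pvDigitVal_digitChar n h]
  | case2 n h ih =>
    rw [pvMyD, if_neg h, pvVal_append_digit, ih,
        pvDigitVal_digitChar _ (Nat.mod_lt _ (by omega))]
    omega

lemma toStr_inj_nonneg (a b : Int) (ha : 0 ≤ a) (hb : 0 ≤ b)
    (h : PySem.Int.toStr a = PySem.Int.toStr b) : a = b := by
  unfold PySem.Int.toStr PySem.Int.toChars at h
  rw [if_neg (by omega), if_neg (by omega)] at h
  have h2 := congrArg String.toList h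
  rw [String.toList_ofList, String.toList_ofList] at h2
  simp only [Nat.toDigits] at h2
  rw [toDigitsCore_eq_myD _ _ _ (Nat.lt_succ_self _),
      toDigitsCore_eq_myD _ _ _ (Nat.lt_succ_self _),
      List.append_nil, List.append_nil] at h2
  have h3 := congrArg pvVal h2
  rw [pvVal_myD, pvVal_myD] at h3
  omega

-- the alias function of A, and injectivity of its key role
def pvAFn (i : Int) : String := "l" ++ PySem.Int.toStr i

lemma pvAFn_inj (i j : Int) (hi : 0 ≤ i) (hj : 0 ≤ j) (h : pvAFn i = pvAFn j) : i = j := by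
  unfold pvAFn at h
  have h2 := congrArg String.toList h
  rw [String.toList_append, String.toList_append] at h2
  have h3 : (PySem.Int.toStr i).toList = (PySem.Int.toStr j).toList :=
    List.append_cancel_left h2
  exact toStr_inj_nonneg i j hi hj (String.ext h3)

-- an association list with distinct keys is its own dict item list
lemma pv_items_ofList {l : List (String × String)} (h : (l.map Prod.fst).Nodup) :
    (PySem.Dict.ofList l).items = l := by
  show (PySem.Dict.update PySem.Dict.empty l).items = l
  unfold PySem.Dict.update
  rw [PySem.Dict.items_foldl_insert_fresh l Prod.fst Prod.snd PySem.Dict.empty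
        (fun a _ => PySem.Dict.contains_empty _) h]
  simp [PySem.Dict.empty]

-- first component of A's select/outer_refs pair fold
lemma pv_fold_sel (j : Int) (l : List (String × String)) :
    ∀ (init1 : List String) (d : PySem.Dict String String),
      (l.foldl (fun (st : List String × PySem.Dict String String) p =>
          (st.1 ++ ["    " ++ p.2 ++ ".l_shipdate AS " ++ chunk_column_name_py p.1],
           st.2.insert p.1 ("chunk_" ++ PySem.Int.toStr j ++ "." ++ chunk_column_name_py p.1)))
        (init1, d)).1
      = init1 ++ l.map (fun p => "    " ++ p.2 ++ ".l_shipdate AS " ++ chunk_column_name_py p.1) := by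
  induction l with
  | nil => intro init1 d; simp
  | cons x t ih => intro init1 d; simp [ih, List.append_assoc]

-- pyRange with step 32: nil and cons
lemma pvRange32_nil (a b : Int) (h : b ≤ a) : PySem.List.pyRange a b 32 = [] := by
  rw [PySem.List.pyRange_of_pos a b (by norm_num : (0:Int) < 32), if_neg (by omega)]
  simp

lemma pvRange32_cons (a b : Int) (h : a < b) :
    PySem.List.pyRange a b 32 = a :: PySem.List.pyRange (a + 32) b 32 := by
  rw [PySem.List.pyRange_of_pos a b (by norm_num : (0:Int) < 32),
      PySem.List.pyRange_of_pos (a + 32) b (by norm_num : (0:Int) < 32), if_pos h]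
  by_cases h2 : a + 32 < b
  · rw [if_pos h2]
    have hc : ((b - a + 32 - 1) / 32).toNat = ((b - (a + 32) + 32 - 1) / 32).toNat + 1 := by
      omega
    rw [hc, List.range_succ_eq_map, List.map_cons, List.map_map]
    congr 1
    · simp
    · refine List.map_congr_left ?_
      intro k _
      simp only [Function.comp_apply]
      push_cast
      ring
  · rw [if_neg h2]
    have hc : ((b - a + 32 - 1) / 32).toNat = 1 := by omega
    rw [hc]
    simp

-- B's block for chunk j starting at alias index s with exclusive end e (proof-side name)
def pvBlock (j s e : Int) : String :=
  let size := e - s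
  let inner := (PySem.List.pyRange 1 (size + 1) 1).map
    (fun k => "c" ++ PySem.Int.toStr j ++ "_" ++ PySem.Int.toStr k)
  let select_lines := ["    " ++ PySem.List.pyGetD inner 0 "" ++ ".rowid AS base_rowid"] ++
    (PySem.List.pyRange 0 size 1).map (fun off =>
      "    " ++ PySem.List.pyGetD inner off "" ++ ".l_shipdate AS " ++ "l" ++
        PySem.Int.toStr (s + off) ++ "_shipdate")
  let tables := PySem.Str.join ",\n      " (inner.map (fun a => "lineitem " ++ a))
  let predicates := PySem.Str.join " AND " ((PySem.List.slice inner (some 1) none).map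
    (fun a => PySem.List.pyGetD inner 0 "" ++ ".rowid = " ++ a ++ ".rowid"))
  let where_clause := if predicates ≠ "" then "\n    WHERE " ++ predicates else ""
  "JOIN (\n" ++ "  SELECT\n" ++ PySem.Str.join ",\n" select_lines ++ "\n" ++ "    FROM\n"
    ++ ("      " ++ tables) ++ where_clause
    ++ ("\n) chunk_" ++ PySem.Int.toStr j ++ "\n")
    ++ ("  ON l1.rowid = chunk_" ++ PySem.Int.toStr j ++ ".base_rowid")

-- one chunk: A's subquery on the alias slice [s, e) equals pvBlock
lemma pv_block_eq (j s e : Int) (h2 : 2 ≤ s) (hse : s < e) :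
    (chunk_subquery_py ((PySem.List.pyRange s e 1).map pvAFn) j).1 = pvBlock j s e := by
  have hL : ((((PySem.List.pyRange s e 1).map pvAFn).length : Int) + 1) = (e - s) + 1 := by
    simp only [List.length_map, PySem.List.length_pyRange_one]
    omega
  have hlenCA : ((PySem.List.pyRange s e 1).map pvAFn).length = (e - s).toNat := by
    simp [PySem.List.length_pyRange_one]
  have hlenIn : (((PySem.List.pyRange 1 (e - s + 1) 1).map
      (fun k => "c" ++ PySem.Int.toStr j ++ "_" ++ PySem.Int.toStr k))).length = (e - s).toNat := by
    simp only [List.length_map, PySem.List.length_pyRange_one]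
    omega
  have hkeys : ((((PySem.List.pyRange s e 1).map pvAFn).zip
      ((PySem.List.pyRange 1 (e - s + 1) 1).map
        (fun k => "c" ++ PySem.Int.toStr j ++ "_" ++ PySem.Int.toStr k))).map Prod.fst).Nodup := by
    rw [List.map_fst_zip (by rw [hlenCA, hlenIn])]
    refine (PySem.List.nodup_pyRange_one s e).map_on ?_
    intro x hx y hy hxy
    rw [PySem.List.mem_pyRange_one] at hx hy
    exact pvAFn_inj x y (by omega) (by omega) hxy
  have hsel : ((((PySem.List.pyRange s e 1).map pvAFn).zip
        ((PySem.List.pyRange 1 (e - s + 1) 1).map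
          (fun k => "c" ++ PySem.Int.toStr j ++ "_" ++ PySem.Int.toStr k))).map
        (fun p => "    " ++ p.2 ++ ".l_shipdate AS " ++ chunk_column_name_py p.1))
      = (PySem.List.pyRange 0 (e - s) 1).map (fun off =>
          "    " ++ PySem.List.pyGetD
              ((PySem.List.pyRange 1 (e - s + 1) 1).map
                (fun k => "c" ++ PySem.Int.toStr j ++ "_" ++ PySem.Int.toStr k)) off ""
            ++ ".l_shipdate AS " ++ "l" ++ PySem.Int.toStr (s + off) ++ "_shipdate") := by
    apply List.ext_getElem
    · simp only [List.length_map, List.length_zip, PySem.List.length_pyRange_one]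
      omega
    · intro k hk1 hk2
      have hkL : k < (e - s).toNat := by
        simp only [List.length_map, List.length_zip, PySem.List.length_pyRange_one] at hk1
        omega
      simp only [List.getElem_map, List.getElem_zip]
      rw [PySem.List.getElem_pyRange_one s e k (by rw [PySem.List.length_pyRange_one]; omega),
          PySem.List.getElem_pyRange_one 0 (e - s) k (by rw [PySem.List.length_pyRange_one]; omega)]
      rw [PySem.List.pyGetD_eq_getElem _ _ (by positivity) (by rw [hlenIn]; omega)]
      simp only [Int.toNat_natCast, zero_add, List.getElem_map]
      unfold chunk_column_name_py pvAFn
      simp [← String.append_assoc]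
      try simp [String.append_assoc]
  simp only [chunk_subquery_py, pvBlock]
  rw [hL, pv_items_ofList hkeys, pv_fold_sel, hsel]

-- A's chunk loop equals a foldl over the stride-32 range of pvBlock
set_option maxHeartbeats 1600000 in
lemma pv_loop_eq (stop : Int) : ∀ (k : Nat) (s j : Int) (acc : List String), 2 ≤ s →
    (stop - s).toNat = k →
    (PySem.List.enumerate (chunked_py ((PySem.List.pyRange s stop 1).map pvAFn) 32) j).foldl
      (fun lines p => lines ++ [(chunk_subquery_py p.2 p.1).1]) acc
    = (PySem.List.enumerate (PySem.List.pyRange s stop 32) j).foldl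
        (fun lines p => lines ++ [pvBlock p.1 p.2 (min (p.2 + 32) stop)]) acc := by
  intro k
  induction k using Nat.strong_induction_on with
  | _ k ih =>
    intro s j acc hs hk
    by_cases hstop : stop ≤ s
    · rw [PySem.List.pyRange_one_eq_nil hstop, pvRange32_nil _ _ hstop, List.map_nil,
          chunked_py, dif_pos (Or.inr rfl)]
      simp [PySem.List.enumerate_nil]
    · have hs' : s < stop := by omega
      have hne : ((PySem.List.pyRange s (min (s + 32) stop) 1).map pvAFn) ≠ [] := by
        have hl : ((PySem.List.pyRange s (min (s + 32) stop) 1).map pvAFn).length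
            = (min (s + 32) stop - s).toNat := by simp [PySem.List.length_pyRange_one]
        intro hnil
        rw [hnil] at hl
        simp only [List.length_nil] at hl
        omega
      rw [PySem.List.pyRange_one_append s (min (s + 32) stop) stop (by omega) (by omega),
          List.map_append, chunked_py]
      rw [dif_neg (by
        rintro (h32 | hnil)
        · norm_num at h32
        · exact hne (List.append_eq_nil_iff.mp hnil).1)]
      rw [pvRange32_cons s stop hs']
      rw [show ((32:Int).toNat) = 32 from by decide]
      by_cases hbig : s + 32 ≤ stop
      · have hE : min (s + 32) stop = s + 32 := by omega
        rw [hE] at hne ⊢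
        have hl32 : ((PySem.List.pyRange s (s + 32) 1).map pvAFn).length = 32 := by
          simp only [List.length_map, PySem.List.length_pyRange_one]
          omega
        rw [List.take_left' hl32, List.drop_left' hl32]
        rw [PySem.List.enumerate_cons, PySem.List.enumerate_cons]
        simp only [List.foldl_cons]
        rw [hE, pv_block_eq j s (s + 32) hs (by omega)]
        exact ih ((stop - (s + 32)).toNat) (by omega) (s + 32) (j + 1) _ (by omega) rfl
      · have hE : min (s + 32) stop = stop := by omega
        rw [hE] at hne ⊢
        have hlle : ((PySem.List.pyRange s stop 1).map pvAFn).length ≤ 32 := by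
          simp only [List.length_map, PySem.List.length_pyRange_one]
          omega
        rw [PySem.List.pyRange_one_eq_nil (le_refl stop), List.map_nil, List.append_nil]
        rw [List.take_of_length_le hlle, List.drop_eq_nil_of_le hlle]
        rw [chunked_py, dif_pos (Or.inr rfl)]
        rw [pvRange32_nil (s + 32) stop (by omega)]
        rw [PySem.List.enumerate_cons, PySem.List.enumerate_cons]
        simp only [List.foldl_cons, PySem.List.enumerate_nil, List.foldl_nil]
        rw [hE, pv_block_eq j s stop hs hs']

-- ---- B-side proof machinery: closed forms of the streaming accumulators ----

def pvSel (j s : Int) : Nat → String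
  | 0 => "    " ++ "c" ++ PySem.Int.toStr j ++ "_" ++ "1" ++ ".rowid AS base_rowid"
  | m + 1 => pvSel j s m ++ ",\n" ++ "    "
      ++ ("c" ++ PySem.Int.toStr j ++ "_" ++ PySem.Int.toStr ((m : Int) + 1))
      ++ ".l_shipdate AS " ++ "l" ++ PySem.Int.toStr (s + (m : Int)) ++ "_shipdate"

def pvTab (j : Int) : Nat → String
  | 0 => ""
  | m + 1 => pvTab j m ++ (if ((m : Int) + 1) = 1 then "" else ",\n      ") ++ "lineitem "
      ++ ("c" ++ PySem.Int.toStr j ++ "_" ++ PySem.Int.toStr ((m : Int) + 1))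

def pvPred (j : Int) : Nat → String
  | 0 => ""
  | m + 1 => if 1 < (m : Int) + 1 then
        pvPred j m ++ (if ((m : Int) + 1) = 2 then "" else " AND ")
          ++ "c" ++ PySem.Int.toStr j ++ "_" ++ "1" ++ ".rowid = "
          ++ ("c" ++ PySem.Int.toStr j ++ "_" ++ PySem.Int.toStr ((m : Int) + 1)) ++ ".rowid"
      else pvPred j m

-- step characterizations
lemma pvStepB_first (n j s : Int) (out sel0 tab0 pred0 : String) :
    pvStepB n (out, j, 0, sel0, tab0, pred0) s =
      if (0 : Int) + 1 = ALIAS_CHUNK_SIZE ∨ s = n + 1 then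
        (out ++ pvFlushB (j + 1) (pvSel (j + 1) s 1) (pvTab (j + 1) 1) (pvPred (j + 1) 1),
         j + 1, 0, pvSel (j + 1) s 1, pvTab (j + 1) 1, pvPred (j + 1) 1)
      else (out, j + 1, (0 : Int) + 1, pvSel (j + 1) s 1, pvTab (j + 1) 1, pvPred (j + 1) 1) := by
  simp only [pvStepB, pvSel, pvTab, pvPred, Nat.cast_zero]
  norm_num

lemma pvStepB_mid (n j s : Int) (m : Nat) (out : String) (hm : 1 ≤ m)
    (hfl : ¬((m : Int) + 1 = ALIAS_CHUNK_SIZE ∨ s + (m : Int) = n + 1)) :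
    pvStepB n (out, j, (m : Int), pvSel j s m, pvTab j m, pvPred j m) (s + (m : Int)) =
      (out, j, (m : Int) + 1, pvSel j s (m + 1), pvTab j (m + 1), pvPred j (m + 1)) := by
  have hm0 : ¬((m : Int) = 0) := by omega
  simp only [pvStepB, if_neg hm0, if_neg hfl]
  try simp only [pvSel, pvTab, pvPred]
  try push_cast
  try rfl

lemma pvStepB_flush (n j s : Int) (m : Nat) (out : String) (hm : 1 ≤ m)
    (hfl : (m : Int) + 1 = ALIAS_CHUNK_SIZE ∨ s + (m : Int) = n + 1) :
    pvStepB n (out, j, (m : Int), pvSel j s m, pvTab j m, pvPred j m) (s + (m : Int)) =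
      (out ++ pvFlushB j (pvSel j s (m + 1)) (pvTab j (m + 1)) (pvPred j (m + 1)),
       j, 0, pvSel j s (m + 1), pvTab j (m + 1), pvPred j (m + 1)) := by
  have hm0 : ¬((m : Int) = 0) := by omega
  simp only [pvStepB, if_neg hm0, if_pos hfl]
  try simp only [pvSel, pvTab, pvPred]
  try push_cast
  try rfl

-- join helpers
lemma str_join_cc (sep a b : String) (t : List String) :
    PySem.Str.join sep (a :: b :: t) = a ++ sep ++ PySem.Str.join sep (b :: t) := by
  simp [PySem.Str.join, PySem.Chars.join_cons_cons, String.append_assoc]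

lemma str_join_single (sep a : String) : PySem.Str.join sep [a] = a := by
  simp [PySem.Str.join, PySem.Chars.join_singleton]

lemma str_join_app (sep y : String) : ∀ xs : List String, xs ≠ [] →
    PySem.Str.join sep (xs ++ [y]) = PySem.Str.join sep xs ++ sep ++ y := by
  intro xs
  induction xs with
  | nil => intro h; exact absurd rfl h
  | cons a t ih =>
    intro _
    cases t with
    | nil => simp [str_join_cc, str_join_single]
    | cons b u =>
      have h2 : a :: b :: u ++ [y] = a :: ((b :: u) ++ [y]) := by simp
      have h3 : (b :: u) ++ [y] = b :: (u ++ [y]) := by simp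
      rw [h2, h3, str_join_cc, ← h3, ih (by simp), str_join_cc]
      simp [String.append_assoc]

-- the inner-alias list of chunk j with sz members, and its pyGetD
def pvInner (j : Int) (sz : Nat) : List String :=
  (PySem.List.pyRange 1 ((sz : Int) + 1) 1).map
    (fun k => "c" ++ PySem.Int.toStr j ++ "_" ++ PySem.Int.toStr k)

lemma pvInner_len (j : Int) (sz : Nat) : (pvInner j sz).length = sz := by
  simp only [pvInner, List.length_map, PySem.List.length_pyRange_one]
  omega

lemma pvInner_get (j : Int) (sz : Nat) (off : Int) (h0 : 0 ≤ off) (h : off < (sz : Int)) :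
    PySem.List.pyGetD (pvInner j sz) off "" =
      "c" ++ PySem.Int.toStr j ++ "_" ++ PySem.Int.toStr (1 + off) := by
  rw [PySem.List.pyGetD_eq_getElem _ _ h0 (by rw [pvInner_len]; omega)]
  simp only [pvInner, List.getElem_map]
  rw [PySem.List.getElem_pyRange_one 1 ((sz : Int) + 1) off.toNat
      (by rw [PySem.List.length_pyRange_one]; omega)]
  rw [Int.toNat_of_nonneg h0]

lemma pvInner_succ (j : Int) (sz : Nat) :
    pvInner j (sz + 1) = pvInner j sz ++
      ["c" ++ PySem.Int.toStr j ++ "_" ++ PySem.Int.toStr ((sz : Int) + 1)] := by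
  simp only [pvInner]
  rw [show (((sz : Nat) + 1 : Nat) : Int) + 1 = ((sz : Int) + 1) + 1 from by push_cast; ring,
      PySem.List.pyRange_one_append 1 ((sz : Int) + 1) (((sz : Int) + 1) + 1) (by omega) (by omega),
      List.map_append]
  congr 1
  rw [PySem.List.pyRange_one_cons (by omega : (sz : Int) + 1 < ((sz : Int) + 1) + 1),
      PySem.List.pyRange_one_eq_nil (by omega)]
  simp

lemma pvInner_ne_nil (j : Int) (sz : Nat) (h : 1 ≤ sz) : pvInner j sz ≠ [] := by
  intro hnil
  have := pvInner_len j sz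
  rw [hnil] at this
  simp at this
  omega

-- (S): the joined select lines equal pvSel
lemma pv_sel_join (j s : Int) (sz : Nat) (h1 : 1 ≤ sz) :
    PySem.Str.join ",\n"
      (("    " ++ PySem.List.pyGetD (pvInner j sz) 0 "" ++ ".rowid AS base_rowid") ::
        (PySem.List.pyRange 0 (sz : Int) 1).map (fun off =>
          "    " ++ PySem.List.pyGetD (pvInner j sz) off "" ++ ".l_shipdate AS " ++ "l"
            ++ PySem.Int.toStr (s + off) ++ "_shipdate"))
    = pvSel j s sz := by
  -- first normalize the pyGetD lookups away
  have hnorm : ∀ sz' : Nat, 1 ≤ sz' →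
      (PySem.List.pyRange 0 (sz' : Int) 1).map (fun off =>
          "    " ++ PySem.List.pyGetD (pvInner j sz') off "" ++ ".l_shipdate AS " ++ "l"
            ++ PySem.Int.toStr (s + off) ++ "_shipdate")
      = (PySem.List.pyRange 0 (sz' : Int) 1).map (fun off =>
          "    " ++ ("c" ++ PySem.Int.toStr j ++ "_" ++ PySem.Int.toStr (1 + off))
            ++ ".l_shipdate AS " ++ "l" ++ PySem.Int.toStr (s + off) ++ "_shipdate") := by
    intro sz' _
    refine List.map_congr_left ?_
    intro x hx
    rw [PySem.List.mem_pyRange_one] at hx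
    rw [pvInner_get j sz' x (by omega) (by omega)]
  rw [hnorm sz h1,
      pvInner_get j sz 0 (by omega) (by omega : (0:Int) < (sz : Int))]
  -- now induct on sz
  induction sz with
  | zero => omega
  | succ m ih =>
    by_cases hm : 1 ≤ m
    · rw [show (((m : Nat) + 1 : Nat) : Int) = (m : Int) + 1 from by push_cast; ring,
          PySem.List.pyRange_one_append 0 (m : Int) ((m : Int) + 1) (by omega) (by omega),
          List.map_append]
      rw [PySem.List.pyRange_one_cons (by omega : (m : Int) < (m : Int) + 1),
          PySem.List.pyRange_one_eq_nil (by omega : (m : Int) + 1 ≤ (m : Int) + 1)]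
      simp only [List.map_cons, List.map_nil]
      rw [show ∀ (b : String) (L : List String) (y : String), b :: (L ++ [y]) = (b :: L) ++ [y]
            from fun _ _ _ => rfl,
          str_join_app _ _ _ (by simp), ih hm]
      simp only [pvSel]
      rw [show (1 + (m : Int)) = (m : Int) + 1 from by ring]
      simp [← String.append_assoc]
      try simp [String.append_assoc]
    · have hm0 : m = 0 := by omega
      subst hm0
      rw [show (((0 : Nat) + 1 : Nat) : Int) = (1 : Int) from by norm_num,
          PySem.List.pyRange_one_cons (by omega : (0:Int) < 1),
          PySem.List.pyRange_one_eq_nil (by omega : (1:Int) ≤ 0 + 1)]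
      simp only [List.map_cons, List.map_nil]
      rw [str_join_cc, str_join_single]
      simp only [pvSel]
      rw [show PySem.Int.toStr (1 + (0:Int)) = "1" from by decide,
          show ((0:Nat) : Int) + 1 = (1:Int) from by norm_num,
          show PySem.Int.toStr (1 : Int) = "1" from by decide]
      rw [show s + (0:Int) = s from by ring, show s + ((0:Nat) : Int) = s from by norm_num]
      simp [← String.append_assoc]
      try simp [String.append_assoc]

-- (T): the joined table list equals pvTab
lemma pv_tab_join (j : Int) (sz : Nat) (h1 : 1 ≤ sz) :
    PySem.Str.join ",\n      " ((pvInner j sz).map (fun a => "lineitem " ++ a)) = pvTab j sz := by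
  induction sz with
  | zero => omega
  | succ m ih =>
    by_cases hm : 1 ≤ m
    · rw [pvInner_succ, List.map_append]
      simp only [List.map_cons, List.map_nil]
      rw [str_join_app _ _ _ (by
            intro hnil
            exact pvInner_ne_nil j m hm (List.map_eq_nil_iff.mp hnil)), ih hm]
      simp only [pvTab]
      rw [if_neg (by omega : ¬((m : Int) + 1 = 1))]
      simp [← String.append_assoc]
      try simp [String.append_assoc]
    · have hm0 : m = 0 := by omega
      subst hm0
      have : pvInner j 1 = ["c" ++ PySem.Int.toStr j ++ "_" ++ PySem.Int.toStr ((0 : Int) + 1)] := by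
        rw [show (1 : Nat) = 0 + 1 from rfl, pvInner_succ j 0]
        simp only [pvInner, Nat.cast_zero]
        rw [PySem.List.pyRange_one_eq_nil (by omega : (0:Int) + 1 ≤ 1)]
        simp
      rw [this]
      simp only [List.map_cons, List.map_nil]
      rw [str_join_single]
      simp only [pvTab]
      rw [if_pos (by norm_num : ((0:Nat) : Int) + 1 = 1)]
      rw [show ((0:Nat) : Int) + 1 = (0:Int) + 1 from by norm_num]
      simp [← String.append_assoc]
      try simp [String.append_assoc]

-- (P): the joined predicates equal pvPred
lemma pv_pred_join (j : Int) (sz : Nat) (h1 : 1 ≤ sz) :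
    PySem.Str.join " AND " ((PySem.List.slice (pvInner j sz) (some 1) none).map
      (fun a => PySem.List.pyGetD (pvInner j sz) 0 "" ++ ".rowid = " ++ a ++ ".rowid"))
    = pvPred j sz := by
  have hget : ∀ sz' : Nat, 1 ≤ sz' → PySem.List.pyGetD (pvInner j sz') 0 "" =
      "c" ++ PySem.Int.toStr j ++ "_" ++ PySem.Int.toStr (1 + (0:Int)) :=
    fun sz' h => pvInner_get j sz' 0 (by omega) (by omega)
  rw [hget sz h1]
  have htail : ∀ sz' : Nat, PySem.List.slice (pvInner j sz') (some 1) none = (pvInner j sz').tail := by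
    intro sz'
    exact PySem.List.slice_from_one _
  rw [htail]
  induction sz with
  | zero => omega
  | succ m ih =>
    by_cases hm : 1 ≤ m
    · rw [pvInner_succ, List.tail_append_of_ne_nil (pvInner_ne_nil j m hm), List.map_append]
      simp only [List.map_cons, List.map_nil]
      by_cases hm2 : 2 ≤ m
      · rw [str_join_app _ _ _ (by
              intro hnil
              have := congrArg List.length hnil
              simp only [List.length_map, List.length_tail, pvInner_len, List.length_nil] at this
              omega), ih hm]
        simp only [pvPred]
        rw [if_pos (by omega : (1:Int) < (m : Int) + 1),
            if_neg (by omega : ¬((m : Int) + 1 = 2))]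
        rw [show PySem.Int.toStr (1 + (0:Int)) = "1" from by decide]
        simp [← String.append_assoc]
        try simp [String.append_assoc]
      try simp [String.append_assoc]
      · have hm1 : m = 1 := by omega
        subst hm1
        have ht1 : (pvInner j 1).tail = [] := by
          have hlen := pvInner_len j 1
          cases h : pvInner j 1 with
          | nil => simp
          | cons a t =>
            rw [h] at hlen
            simp only [List.length_cons] at hlen
            have : t = [] := List.length_eq_zero_iff.mp (by omega)
            simp [this]
        rw [← List.map_tail, ht1]
        simp only [List.map_nil, List.nil_append]
        rw [str_join_single]
        simp only [pvPred]
        rw [if_pos (by omega : (1:Int) < ((1:Nat) : Int) + 1),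
            if_pos (by norm_num : ((1:Nat) : Int) + 1 = 2),
            if_neg (by omega : ¬((1:Int) < ((0:Nat) : Int) + 1))]
        rw [show PySem.Int.toStr (1:Int) = "1" from by decide]
        simp [← String.append_assoc]
        try simp [String.append_assoc]
    · have hm0 : m = 0 := by omega
      subst hm0
      have ht1 : (pvInner j 1).tail = [] := by
        have hlen := pvInner_len j 1
        cases h : pvInner j 1 with
        | nil => simp
        | cons a t =>
          rw [h] at hlen
          simp only [List.length_cons] at hlen
          have : t = [] := List.length_eq_zero_iff.mp (by omega)
          simp [this]
      rw [show (1 : Nat) = 0 + 1 from rfl] at ht1 ⊢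
      rw [ht1]
      simp only [List.map_nil]
      simp only [pvPred]
      rw [if_neg (by omega : ¬((1:Int) < ((0:Nat) : Int) + 1))]
      simp [PySem.Str.join, PySem.Chars.join_nil]
      try rfl

-- the flushed streaming block equals "\n" ++ pvBlock
lemma pv_flush_eq (j s e : Int) (hse : s < e) :
    pvFlushB j (pvSel j s (e - s).toNat) (pvTab j (e - s).toNat) (pvPred j (e - s).toNat)
      = "\n" ++ pvBlock j s e := by
  have hsz : ((e - s).toNat : Int) = e - s := by omega
  have h1 : 1 ≤ (e - s).toNat := by omega
  simp only [pvBlock]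
  rw [show (PySem.List.pyRange 1 (e - s + 1) 1).map
        (fun k => "c" ++ PySem.Int.toStr j ++ "_" ++ PySem.Int.toStr k) = pvInner j (e - s).toNat
      from by rw [pvInner, hsz],
      show (PySem.List.pyRange 0 (e - s) 1) = PySem.List.pyRange 0 (((e - s).toNat : Int)) 1
      from by rw [hsz]]
  rw [show (["    " ++ PySem.List.pyGetD (pvInner j (e - s).toNat) 0 "" ++ ".rowid AS base_rowid"] ++
        (PySem.List.pyRange 0 (((e - s).toNat : Int)) 1).map (fun off =>
          "    " ++ PySem.List.pyGetD (pvInner j (e - s).toNat) off "" ++ ".l_shipdate AS " ++ "l"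
            ++ PySem.Int.toStr (s + off) ++ "_shipdate"))
      = (("    " ++ PySem.List.pyGetD (pvInner j (e - s).toNat) 0 "" ++ ".rowid AS base_rowid") ::
        (PySem.List.pyRange 0 (((e - s).toNat : Int)) 1).map (fun off =>
          "    " ++ PySem.List.pyGetD (pvInner j (e - s).toNat) off "" ++ ".l_shipdate AS " ++ "l"
            ++ PySem.Int.toStr (s + off) ++ "_shipdate")) from rfl]
  rw [pv_sel_join j s _ h1, pv_tab_join j _ h1, pv_pred_join j _ h1]
  simp only [pvFlushB]
  split_ifs with hp
  · simp [← String.append_assoc]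
    try simp [String.append_assoc]
  · simp [← String.append_assoc]
    try simp [String.append_assoc]

-- within one chunk: the streaming fold advances to the flush
lemma pv_inner_loop (n j s : Int) (hs : 2 ≤ s) (hlt : s < n + 2) :
    ∀ (d m : Nat) (out : String), 1 ≤ m → (m : Int) + (d : Int) + 1 = min (s + 32) (n + 2) - s →
    (PySem.List.pyRange (s + (m : Int)) (n + 2) 1).foldl (pvStepB n)
      (out, j, (m : Int), pvSel j s m, pvTab j m, pvPred j m)
    = (PySem.List.pyRange (min (s + 32) (n + 2)) (n + 2) 1).foldl (pvStepB n)
        (out ++ pvFlushB j (pvSel j s (min (s + 32) (n + 2) - s).toNat)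
                  (pvTab j (min (s + 32) (n + 2) - s).toNat)
                  (pvPred j (min (s + 32) (n + 2) - s).toNat),
         j, 0, pvSel j s (min (s + 32) (n + 2) - s).toNat,
         pvTab j (min (s + 32) (n + 2) - s).toNat,
         pvPred j (min (s + 32) (n + 2) - s).toNat) := by
  intro d
  induction d with
  | zero =>
    intro m out hm he
    have hmv : min (s + 32) (n + 2) = s + (m : Int) + 1 := by omega
    have hsz : (min (s + 32) (n + 2) - s).toNat = m + 1 := by omega
    have hcons : PySem.List.pyRange (s + (m : Int)) (n + 2) 1
        = (s + (m : Int)) :: PySem.List.pyRange (s + (m : Int) + 1) (n + 2) 1 :=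
      PySem.List.pyRange_one_cons (by omega)
    rw [hcons]
    simp only [List.foldl_cons]
    rw [pvStepB_flush n j s m out hm (by
          simp only [ALIAS_CHUNK_SIZE]
          by_cases hb : s + 32 ≤ n + 2
          · left; omega
          · right; omega)]
    rw [hsz, hmv]
  | succ d ih =>
    intro m out hm he
    have hcons : PySem.List.pyRange (s + (m : Int)) (n + 2) 1
        = (s + (m : Int)) :: PySem.List.pyRange (s + (m : Int) + 1) (n + 2) 1 :=
      PySem.List.pyRange_one_cons (by omega)
    rw [hcons]
    simp only [List.foldl_cons]
    rw [pvStepB_mid n j s m out hm (by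
          simp only [ALIAS_CHUNK_SIZE]
          omega)]
    have hstep := ih (m + 1) out (by omega) (by push_cast; omega)
    rw [show s + ((m : Nat) + 1 : Nat) = s + (m : Int) + 1 from by push_cast; ring,
        show (((m : Nat) + 1 : Nat) : Int) = (m : Int) + 1 from by norm_num] at hstep
    exact hstep

-- the whole streaming loop equals the foldl of the chunk blocks
set_option maxHeartbeats 1600000 in
lemma pv_outer_loop (n : Int) : ∀ (k : Nat) (s cj : Int) (out sel0 tab0 pred0 : String),
    2 ≤ s → (n + 2 - s).toNat = k →
    ((PySem.List.pyRange s (n + 2) 1).foldl (pvStepB n) (out, cj, 0, sel0, tab0, pred0)).1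
    = (PySem.List.enumerate (PySem.List.pyRange s (n + 2) 32) (cj + 1)).foldl
        (fun o p => o ++ "\n" ++ pvBlock p.1 p.2 (min (p.2 + 32) (n + 2))) out := by
  intro k
  induction k using Nat.strong_induction_on with
  | _ k ih =>
    intro s cj out sel0 tab0 pred0 hs hk
    by_cases hstop : n + 2 ≤ s
    · rw [PySem.List.pyRange_one_eq_nil hstop, pvRange32_nil _ _ hstop]
      simp [PySem.List.enumerate_nil]
    · have hs' : s < n + 2 := by omega
      rw [PySem.List.pyRange_one_cons hs', pvRange32_cons s (n + 2) hs']
      simp only [List.foldl_cons]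
      rw [PySem.List.enumerate_cons]
      simp only [List.foldl_cons]
      rw [pvStepB_first]
      by_cases hone : s = n + 1
      · -- final single-alias chunk: flush immediately
        rw [if_pos (Or.inr hone)]
        have hnil1 : PySem.List.pyRange (s + 1) (n + 2) 1 = [] :=
          PySem.List.pyRange_one_eq_nil (by omega)
        have hnil32 : PySem.List.pyRange (s + 32) (n + 2) 32 = [] :=
          pvRange32_nil _ _ (by omega)
        rw [hnil1, hnil32]
        simp only [List.foldl_nil, PySem.List.enumerate_nil]
        have hmin : min (s + 32) (n + 2) = s + 1 := by omega
        have hflush := pv_flush_eq (cj + 1) s (s + 1) (by omega)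
        rw [show ((s + 1 : Int) - s).toNat = 1 from by omega] at hflush
        rw [hmin, hflush, ← String.append_assoc]
      · -- chunk has at least two aliases: no flush on the first step
        rw [if_neg (by simp only [ALIAS_CHUNK_SIZE]; omega)]
        have hmin1 : s + 1 < min (s + 32) (n + 2) := by omega
        have hstep := pv_inner_loop n (cj + 1) s hs hs'
          ((min (s + 32) (n + 2) - s).toNat - 2) 1 out (by omega) (by push_cast; try omega)
        rw [show s + ((1 : Nat) : Int) = s + 1 from by norm_num] at hstep
        rw [show ((0 : Int) + 1) = ((1 : Nat) : Int) from by norm_num, hstep]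
        set e := min (s + 32) (n + 2) with hE
        have hrec := ih ((n + 2 - e).toNat) (by omega) e (cj + 1)
          (out ++ pvFlushB (cj + 1) (pvSel (cj + 1) s (e - s).toNat)
            (pvTab (cj + 1) (e - s).toNat) (pvPred (cj + 1) (e - s).toNat))
          (pvSel (cj + 1) s (e - s).toNat) (pvTab (cj + 1) (e - s).toNat)
          (pvPred (cj + 1) (e - s).toNat) (by omega) rfl
        rw [hrec]
        rw [pv_flush_eq (cj + 1) s e (by omega)]
        rw [show out ++ ("\n" ++ pvBlock (cj + 1) s e) = out ++ "\n" ++ pvBlock (cj + 1) s e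
            from by rw [String.append_assoc]]
        by_cases hbig : s + 32 ≤ n + 2
        · rw [show e = s + 32 from by omega]
        · rw [show PySem.List.pyRange (s + 32) (n + 2) 32 = [] from pvRange32_nil _ _ (by omega),
              show PySem.List.pyRange e (n + 2) 32 = [] from pvRange32_nil _ _ (by omega)]

-- bridge: "\n".join of a snoc-fold of lines = string-fold of the same lines
lemma pv_foldl_snoc {α : Type} (f : α → String) :
    ∀ (L : List α) (acc : List String),
      L.foldl (fun lines p => lines ++ [f p]) acc = acc ++ L.map f := by
  intro L
  induction L with
  | nil => intro acc; simp
  | cons x t ih => intro acc; simp [ih, List.append_assoc]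

lemma pv_foldl_pull : ∀ (M : List String) (c b : String),
    M.foldl (fun o x => o ++ "\n" ++ x) (c ++ b) = c ++ M.foldl (fun o x => o ++ "\n" ++ x) b := by
  intro M
  induction M with
  | nil => intro c b; simp
  | cons y M ih =>
    intro c b
    simp only [List.foldl_cons]
    rw [show c ++ b ++ "\n" ++ y = c ++ (b ++ "\n" ++ y) from by simp only [String.append_assoc]]
    try rw [ih]
    try rfl

lemma pv_join_fold : ∀ (M : List String) (a : String),
    PySem.Str.join "\n" (a :: M) = M.foldl (fun o x => o ++ "\n" ++ x) a := by
  intro M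
  induction M with
  | nil => intro a; simp [str_join_single]
  | cons x M ih =>
    intro a
    rw [str_join_cc]
    simp only [List.foldl_cons]
    rw [ih x, show a ++ "\n" ++ x = (a ++ "\n") ++ x from rfl, pv_foldl_pull]
    try simp [String.append_assoc, pv_foldl_pull]

-- ===== VERDICT (by name: the statement is the Claim_ definition above) =====
set_option maxHeartbeats 1600000 in
theorem chunked_from_clause_py_spec : Claim_equal_chunked_from_clause_py := by
  intro n _ hpre
  unfold Pre_chunked_from_clause_py at hpre
  unfold Spec_chunked_from_clause_py
  simp only [chunked_from_clause_py, chunked_from_clause_py_alt, alias_names_py,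
    ALIAS_CHUNK_SIZE]
  rw [if_neg (by omega : ¬ n < 1), if_neg (by omega : ¬ n < 1)]
  rw [PySem.List.pyRange_one_cons (by omega : (1:Int) < n + 2),
      show (fun i => "l" ++ PySem.Int.toStr i) = pvAFn from rfl, List.map_cons,
      PySem.List.slice_from_one, List.tail_cons,
      show (1:Int) + 1 = 2 from by norm_num]
  rw [pv_loop_eq (n + 2) ((n + 2) - 2).toNat 2 1 ["FROM lineitem l1"] (by omega) rfl]
  rw [pv_foldl_snoc, show ["FROM lineitem l1"] ++
        (PySem.List.enumerate (PySem.List.pyRange 2 (n + 2) 32) 1).map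
          (fun p => pvBlock p.1 p.2 (min (p.2 + 32) (n + 2)))
      = "FROM lineitem l1" ::
        (PySem.List.enumerate (PySem.List.pyRange 2 (n + 2) 32) 1).map
          (fun p => pvBlock p.1 p.2 (min (p.2 + 32) (n + 2))) from rfl,
      pv_join_fold, List.foldl_map]
  rw [pv_outer_loop n ((n + 2) - 2).toNat 2 0 "FROM lineitem l1" "" "" "" (by omega) rfl]
  try norm_num
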